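-- pv_equiv track=rewrite | github.com/mgb22/MGB_Library | Marcal_lib.py | interpolat
-- ===== SOURCE A (Python) =====
-- def interpolat(senyal_audio,I):
--     """
--     Interpolate the signal from a factor I
--     """
--     contador = 0
--     auxiliar = senyal_audio.copy()
--     for i in range (0,(len(auxiliar)+(len(auxiliar)//2)*I)): #Final quantity
--         if contador == 2:
--             contador=-I+1
--             for j in range(0,I):
--                 auxiliar.insert(i,0)
--         else:
--             contador += 1
--     return auxiliar
-- ===== SOURCE B (Python) =====
-- def interpolat(senyal_audio, I):
--     """
--     Interpolate the signal from a factor I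
--     """
--     n = len(senyal_audio)
--     J = I if I > 0 else 0
--     result = [0] * (n + (n // 2) * J)
--     for k, x in enumerate(senyal_audio):
--         result[k + (k // 2) * J] = x
--     return result
-- ===== Notes on version B (the rewrite author's own statement) =====
-- stated objective: faster
-- what changed: Replaces A's growing-list loop with repeated mid-list insert and a modular counter by a preallocated zero buffer and a closed-form arithmetic scatter result[k + (k//2)*J] = x in one pass; intended as faster (measured 45.59x at the largest size both finished; on inputs with huge I both programs time out because the output itself is huge).
import Mathlib
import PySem

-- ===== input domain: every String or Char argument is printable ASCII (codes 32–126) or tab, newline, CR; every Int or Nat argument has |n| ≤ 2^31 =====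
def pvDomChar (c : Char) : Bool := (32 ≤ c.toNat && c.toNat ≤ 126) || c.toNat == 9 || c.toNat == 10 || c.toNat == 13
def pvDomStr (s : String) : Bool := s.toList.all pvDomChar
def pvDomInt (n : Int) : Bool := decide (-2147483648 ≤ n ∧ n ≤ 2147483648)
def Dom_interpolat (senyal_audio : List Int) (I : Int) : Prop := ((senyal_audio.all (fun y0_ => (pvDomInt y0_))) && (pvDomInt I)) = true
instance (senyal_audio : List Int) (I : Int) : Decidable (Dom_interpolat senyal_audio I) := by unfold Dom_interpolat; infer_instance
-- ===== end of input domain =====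

-- B replaces A's growing-list loop (repeated mid-list insert driven by a modular
-- counter) by a preallocated zero buffer filled with a closed-form arithmetic
-- scatter in one pass (intended as faster; a timing run measured 45.59x at
-- the largest size both programs finished).


-- ===== PORT A =====
-- contador/auxiliar loop; inner 'for j in range(0, I): auxiliar.insert(i, 0)'
def interpolat (senyal_audio : List Int) (I : Int) : List Int :=
  let auxiliar := senyal_audio   -- senyal_audio.copy()
  let st := (PySem.List.pyRange 0 ((auxiliar.length : Int) + (PySem.Int.floordiv (auxiliar.length : Int) 2) * I) 1).foldl
    (fun (st : Int × List Int) i =>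
      if st.1 == 2 then
        (-I + 1, (PySem.List.pyRange 0 I 1).foldl (fun aux _ => PySem.List.insert aux i 0) st.2)
      else
        (st.1 + 1, st.2))
    ((0 : Int), auxiliar)
  st.2

-- ===== PORT B =====
-- result[idx] = x ported as List.set (idx is always in range, where Python's
-- item assignment and List.set agree)
def interpolat_alt (senyal_audio : List Int) (I : Int) : List Int :=
  let n : Int := senyal_audio.length
  let J : Int := if I > 0 then I else 0
  let result := List.replicate (n + (PySem.Int.floordiv n 2) * J).toNat (0 : Int)
  (PySem.List.enumerate senyal_audio 0).foldl
    (fun res kx => res.set (kx.1 + (PySem.Int.floordiv kx.1 2) * J).toNat kx.2) result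

-- ===== PRECONDITION & SPEC =====
def Spec_interpolat (senyal_audio : List Int) (I : Int) (out : List Int) : Prop := out = interpolat_alt senyal_audio I
instance (senyal_audio : List Int) (I : Int) (out : List Int) : Decidable (Spec_interpolat senyal_audio I out) := by unfold Spec_interpolat; infer_instance

-- ===== CLAIM (what is proved, stated in full; the proofs are below) =====
def Claim_equal_interpolat : Prop := ∀ (senyal_audio : List Int) (I : Int), Dom_interpolat senyal_audio I → Spec_interpolat senyal_audio I (interpolat senyal_audio I)

-- ===== LEMMAS AND PROOFS =====

-- Common characterisation of both programs' output: two samples, then z zeros, repeated;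
-- a trailing odd sample is kept bare.
def chunkZ (z : Nat) : List Int → List Int
  | a :: b :: rest => a :: b :: (List.replicate z 0 ++ chunkZ z rest)
  | [a] => [a]
  | [] => []

theorem chunkZ_zero (xs : List Int) : chunkZ 0 xs = xs := by
  induction xs using chunkZ.induct with
  | case1 a b rest ih => simp [chunkZ, ih]
  | case2 a => simp [chunkZ]
  | case3 => simp [chunkZ]

theorem set_append_len (pre : List Int) (x a : Int) (t : List Int) :
    (pre ++ x :: t).set pre.length a = pre ++ a :: t := by
  induction pre with
  | nil => simp
  | cons p ps ih => simp [ih]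

-- B side: the scatter over the zero buffer produces chunkZ
theorem B_scatter (J : Int) (hJ : 0 ≤ J) (xs : List Int) :
    ∀ (q : Nat) (pre : List Int), pre.length = 2 * q + q * J.toNat →
    (PySem.List.enumerate xs (2 * (q : Int))).foldl
      (fun res kx => res.set (kx.1 + (PySem.Int.floordiv kx.1 2) * J).toNat kx.2)
      (pre ++ List.replicate (xs.length + (xs.length / 2) * J.toNat) 0)
    = pre ++ chunkZ J.toNat xs := by
  induction xs using chunkZ.induct with
  | case2 a =>
    intro q pre hpre
    have hp0 : ((2 * (q : Int) + PySem.Int.floordiv (2 * (q : Int)) 2 * J).toNat) = pre.length := by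
      rw [PySem.Int.floordiv_eq_ediv_of_pos (by norm_num)]
      have h2 : (2 * (q : Int)) / 2 = (q : Int) := by omega
      have hc : (2 * (q : Int) + (q : Int) * J) = ((2 * q + q * J.toNat : Nat) : Int) := by
        push_cast [Int.toNat_of_nonneg hJ]; ring
      rw [h2, hc, Int.toNat_natCast, hpre]
    have hcnt : [a].length + [a].length / 2 * J.toNat = 1 := by simp
    simp only [PySem.List.enumerate_cons, PySem.List.enumerate_nil, List.foldl_cons, List.foldl_nil]
    rw [hcnt, hp0, show (List.replicate 1 (0:Int)) = 0 :: [] from rfl, set_append_len]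
    rfl
  | case3 =>
    intro q pre hpre
    simp [chunkZ]
  | case1 a b rest ih =>
    intro q pre hpre
    have hp0 : ((2 * (q : Int) + PySem.Int.floordiv (2 * (q : Int)) 2 * J).toNat) = pre.length := by
      rw [PySem.Int.floordiv_eq_ediv_of_pos (by norm_num)]
      have h2 : (2 * (q : Int)) / 2 = (q : Int) := by omega
      have hc : (2 * (q : Int) + (q : Int) * J) = ((2 * q + q * J.toNat : Nat) : Int) := by
        push_cast [Int.toNat_of_nonneg hJ]; ring
      rw [h2, hc, Int.toNat_natCast, hpre]
    have hp1 : ((2 * (q : Int) + 1 + PySem.Int.floordiv (2 * (q : Int) + 1) 2 * J).toNat) = pre.length + 1 := by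
      rw [PySem.Int.floordiv_eq_ediv_of_pos (by norm_num)]
      have h2 : (2 * (q : Int) + 1) / 2 = (q : Int) := by omega
      have hc : (2 * (q : Int) + 1 + (q : Int) * J) = ((2 * q + q * J.toNat + 1 : Nat) : Int) := by
        push_cast [Int.toNat_of_nonneg hJ]; ring
      rw [h2, hc, Int.toNat_natCast, hpre]
    have hdiv : (rest.length + 1 + 1) / 2 = rest.length / 2 + 1 := by omega
    have hcount : (a :: b :: rest).length + ((a :: b :: rest).length / 2) * J.toNat
        = 2 + (J.toNat + (rest.length + rest.length / 2 * J.toNat)) := by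
      simp only [List.length_cons]
      rw [hdiv]; ring
    have hbuf : List.replicate ((a :: b :: rest).length + ((a :: b :: rest).length / 2) * J.toNat) (0:Int)
        = 0 :: 0 :: (List.replicate J.toNat 0 ++ List.replicate (rest.length + (rest.length / 2) * J.toNat) 0) := by
      rw [hcount, List.replicate_add, List.replicate_add]
      rfl
    simp only [PySem.List.enumerate_cons, List.foldl_cons]
    rw [hbuf, hp0, set_append_len pre 0 a, hp1]
    have hre : pre ++ a :: 0 :: (List.replicate J.toNat 0 ++ List.replicate (rest.length + rest.length / 2 * J.toNat) 0)
        = (pre ++ [a]) ++ 0 :: (List.replicate J.toNat 0 ++ List.replicate (rest.length + rest.length / 2 * J.toNat) 0) := by simp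
    have hlen1 : pre.length + 1 = (pre ++ [a]).length := by simp
    rw [hre, hlen1, set_append_len]
    have hre2 : (pre ++ [a]) ++ b :: (List.replicate J.toNat 0 ++ List.replicate (rest.length + rest.length / 2 * J.toNat) 0)
        = (pre ++ [a, b] ++ List.replicate J.toNat 0) ++ List.replicate (rest.length + rest.length / 2 * J.toNat) 0 := by simp
    rw [hre2]
    have hstart : (2 * (q : Int) + 1 + 1) = 2 * ((q + 1 : Nat) : Int) := by push_cast; ring
    rw [hstart]
    rw [ih (q + 1) (pre ++ [a, b] ++ List.replicate J.toNat 0) (by simp [hpre]; ring)]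
    simp [chunkZ]

-- A side, I ≤ 0: the inner insert loop is empty so the list never changes
theorem A_id_of_nonpos (I : Int) (hI : I ≤ 0) (l : List Int) :
    ∀ (st : Int × List Int),
    (l.foldl (fun (st : Int × List Int) i =>
      if st.1 == 2 then
        (-I + 1, (PySem.List.pyRange 0 I 1).foldl (fun aux _ => PySem.List.insert aux i 0) st.2)
      else (st.1 + 1, st.2)) st).2 = st.2 := by
  induction l with
  | nil => intro st; simp
  | cons x t ih =>
    intro st
    simp only [List.foldl_cons]
    have hstep : (if (st.1 == 2) = true then
        ((-I + 1 : Int), (PySem.List.pyRange 0 I 1).foldl (fun aux _ => PySem.List.insert aux x 0) st.2)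
      else (st.1 + 1, st.2))
      = (if (st.1 == 2) = true then (-I + 1, st.2) else (st.1 + 1, st.2)) := by
      rw [PySem.List.pyRange_one_eq_nil hI, List.foldl_nil]
    rw [hstep]
    by_cases h : (st.1 == 2) = true
    · rw [if_pos h]; exact ih _
    · rw [if_neg h]; exact ih _

-- the inner insert loop: I zeros appear at position front.length
theorem insN : ∀ (l : List Int) (i : Int) (front tail : List Int), i = (front.length : Int) →
    l.foldl (fun aux _ => PySem.List.insert aux i 0) (front ++ tail)
    = front ++ List.replicate l.length 0 ++ tail := by
  intro l
  induction l with
  | nil => intro i front tail h; simp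
  | cons x t ih =>
    intro i front tail h
    simp only [List.foldl_cons]
    have h1 : PySem.List.insert (front ++ tail) i 0 = front ++ 0 :: tail := by
      rw [h, PySem.List.insert_natCast _ _ _ (by simp)]
      simp
    rw [h1, ih i front (0 :: tail) h]
    simp [List.replicate_succ']

-- a stretch of iterations that only increment contador
theorem incr_run (I : Int) (l : List Int) : ∀ (c : Int) (aux : List Int), c + l.length ≤ 2 →
    l.foldl (fun (st : Int × List Int) i =>
      if st.1 == 2 then
        (-I + 1, (PySem.List.pyRange 0 I 1).foldl (fun aux _ => PySem.List.insert aux i 0) st.2)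
      else (st.1 + 1, st.2)) (c, aux)
    = (c + l.length, aux) := by
  induction l with
  | nil => intro c aux h; simp
  | cons x t ih =>
    intro c aux h
    have hc : (c == 2) = false := by
      simp only [List.length_cons] at h
      simp only [beq_eq_false_iff_ne]
      push_cast at h ⊢
      omega
    simp only [List.foldl_cons, hc, Bool.false_eq_true, if_false]
    rw [ih (c + 1) aux (by simp only [List.length_cons] at h; push_cast at h ⊢; omega)]
    simp only [List.length_cons, Prod.mk.injEq]
    constructor
    · push_cast; ring
    · trivial

-- A side, 1 ≤ I: the loop produces chunkZ
theorem A_loop (I : Int) (hI : 1 ≤ I) (xs : List Int) :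
    ∀ (pre : List Int),
    (PySem.List.pyRange (pre.length : Int)
        ((pre.length : Int) + ((xs.length + (xs.length / 2) * I.toNat : Nat) : Int)) 1).foldl
      (fun (st : Int × List Int) i =>
        if st.1 == 2 then
          (-I + 1, (PySem.List.pyRange 0 I 1).foldl (fun aux _ => PySem.List.insert aux i 0) st.2)
        else (st.1 + 1, st.2))
      ((0 : Int), pre ++ xs)
    = (((xs.length % 2 : Nat) : Int), pre ++ chunkZ I.toNat xs) := by
  induction xs using chunkZ.induct with
  | case3 =>
    intro pre
    simp only [List.length_nil, Nat.zero_div, Nat.zero_mul, Nat.cast_zero, add_zero]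
    rw [PySem.List.pyRange_one_eq_nil (a := (pre.length : Int)) (b := (pre.length : Int)) (by omega)]
    simp [chunkZ]
  | case2 a =>
    intro pre
    have h1 : ([a].length + [a].length / 2 * I.toNat : Nat) = 1 := by simp
    rw [h1]
    rw [show ((1 : Nat) : Int) = 1 from rfl, PySem.List.pyRange_one_singleton]
    simp [chunkZ]
  | case1 a b rest ih =>
    intro pre
    set f := (fun (st : Int × List Int) i =>
        if st.1 == 2 then
          (-I + 1, (PySem.List.pyRange 0 I 1).foldl (fun aux _ => PySem.List.insert aux i 0) st.2)
        else (st.1 + 1, st.2)) with hf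
    have hzI : ((I.toNat : Nat) : Int) = I := Int.toNat_of_nonneg (by omega)
    have hdiv : (rest.length + 1 + 1) / 2 = rest.length / 2 + 1 := by omega
    have hC : ((a :: b :: rest).length + ((a :: b :: rest).length / 2) * I.toNat : Nat)
        = 2 + I.toNat + (rest.length + rest.length / 2 * I.toNat) := by
      simp only [List.length_cons]
      rw [hdiv]; ring
    rw [hC]
    have hCint : (((2 + I.toNat + (rest.length + rest.length / 2 * I.toNat) : Nat)) : Int)
        = 2 + I + ((rest.length + rest.length / 2 * I.toNat : Nat) : Int) := by
      push_cast [hzI]; ring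
    rw [hCint]
    set p : Int := (pre.length : Int) with hp
    set m : Int := ((rest.length + rest.length / 2 * I.toNat : Nat) : Int) with hm
    have hm0 : 0 ≤ m := by rw [hm]; positivity
    have hsplit : PySem.List.pyRange p (p + (2 + I + m)) 1
        = p :: (p + 1) :: (p + 1 + 1) :: (PySem.List.pyRange (p + 1 + 1 + 1) (p + 2 + I) 1
            ++ PySem.List.pyRange (p + 2 + I) (p + (2 + I + m)) 1) := by
      rw [PySem.List.pyRange_one_cons (a := p) (b := p + (2 + I + m)) (by omega)]
      rw [PySem.List.pyRange_one_cons (a := p + 1) (b := p + (2 + I + m)) (by omega)]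
      rw [PySem.List.pyRange_one_cons (a := p + 1 + 1) (b := p + (2 + I + m)) (by omega)]
      rw [PySem.List.pyRange_one_append (p + 1 + 1 + 1) (p + 2 + I) (p + (2 + I + m)) (by omega) (by omega)]
    rw [hsplit]
    simp only [List.foldl_cons, List.foldl_append]
    have s1 : f ((0 : Int), pre ++ (a :: b :: rest)) p = (1, pre ++ (a :: b :: rest)) := by
      rw [hf]; norm_num
    have s2 : f ((1 : Int), pre ++ (a :: b :: rest)) (p + 1) = (2, pre ++ (a :: b :: rest)) := by
      rw [hf]; norm_num
    have s3 : f ((2 : Int), pre ++ (a :: b :: rest)) (p + 1 + 1)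
        = (-I + 1, ((pre ++ [a, b]) ++ List.replicate I.toNat 0) ++ rest) := by
      rw [hf]
      simp only [BEq.rfl, if_true]
      refine Prod.ext rfl ?_
      show (PySem.List.pyRange 0 I 1).foldl (fun aux _ => PySem.List.insert aux (p + 1 + 1) 0) (pre ++ (a :: b :: rest))
          = ((pre ++ [a, b]) ++ List.replicate I.toNat 0) ++ rest
      rw [show pre ++ (a :: b :: rest) = (pre ++ [a, b]) ++ rest by simp]
      rw [insN _ _ (pre ++ [a, b]) rest (by simp [hp]; ring)]
      rw [PySem.List.length_pyRange_one]
      simp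
    rw [s1, s2, s3]
    have hrun : (PySem.List.pyRange (p + 1 + 1 + 1) (p + 2 + I) 1).foldl f
        (-I + 1, ((pre ++ [a, b]) ++ List.replicate I.toNat 0) ++ rest)
        = (0, ((pre ++ [a, b]) ++ List.replicate I.toNat 0) ++ rest) := by
      rw [hf]
      rw [incr_run I _ _ _ (by rw [PySem.List.length_pyRange_one]; omega)]
      rw [PySem.List.length_pyRange_one]
      have : ((p + 2 + I - (p + 1 + 1 + 1)).toNat : Int) = I - 1 := by
        rw [Int.toNat_of_nonneg (by omega)]; ring
      rw [this]; norm_num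
    rw [hrun]
    have hlenN : ((pre ++ [a, b]) ++ List.replicate I.toNat 0).length = pre.length + 2 + I.toNat := by
      simp only [List.length_append, List.length_replicate, List.length_cons, List.length_nil]
    have hlen' : ((((pre ++ [a, b]) ++ List.replicate I.toNat 0).length : Nat) : Int) = p + 2 + I := by
      rw [hlenN, hp]
      push_cast [hzI]
      ring_nf
    have hbound : p + (2 + I + m) = ((((pre ++ [a, b]) ++ List.replicate I.toNat 0).length : Nat) : Int) + m := by
      rw [hlen']; ring
    rw [hbound, ← hlen', hlen', ← hlen']
    rw [hm]
    have := ih ((pre ++ [a, b]) ++ List.replicate I.toNat 0)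
    rw [hf] at this ⊢
    rw [this]
    have hmod : ((rest.length % 2 : Nat) : Int) = (((a :: b :: rest).length % 2 : Nat) : Int) := by
      simp only [List.length_cons]
      congr 1
      omega
    rw [hmod]
    simp [chunkZ]

-- ===== VERDICT (by name: the statement is the Claim_ definition above) =====
theorem interpolat_spec : Claim_equal_interpolat := by
  intro xs I _
  unfold Spec_interpolat
  show interpolat xs I = interpolat_alt xs I
  by_cases hpos : 0 < I
  · have hzI : ((I.toNat : Nat) : Int) = I := Int.toNat_of_nonneg (by omega)
    have hb : (xs.length : Int) + PySem.Int.floordiv (xs.length : Int) 2 * I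
        = ((xs.length + xs.length / 2 * I.toNat : Nat) : Int) := by
      rw [show ((2 : Int)) = ((2 : Nat) : Int) from rfl, PySem.Int.floordiv_natCast]
      push_cast [hzI]; ring
    have hA : interpolat xs I = chunkZ I.toNat xs := by
      unfold interpolat
      simp only [hb]
      have h := A_loop I (by omega) xs []
      simp only [List.length_nil, Nat.cast_zero, List.nil_append, zero_add] at h
      rw [h]
    have hB : interpolat_alt xs I = chunkZ I.toNat xs := by
      unfold interpolat_alt
      simp only [if_pos hpos, hb, Int.toNat_natCast]
      have h := B_scatter I (le_of_lt hpos) xs 0 [] (by simp)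
      simp only [Nat.cast_zero, mul_zero, List.nil_append] at h
      rw [h]
    rw [hA, hB]
  · have hA : interpolat xs I = xs := by
      unfold interpolat
      exact A_id_of_nonpos I (by omega) _ ((0 : Int), xs)
    have hB : interpolat_alt xs I = xs := by
      unfold interpolat_alt
      simp only [if_neg hpos]
      have h := B_scatter 0 le_rfl xs 0 [] (by simp)
      simp only [Nat.cast_zero, mul_zero, List.nil_append, add_zero, Int.toNat_natCast,
        Int.toNat_zero, chunkZ_zero] at h ⊢
      exact h
    rw [hA, hB]
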